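-- pv_equiv track=rewrite | github.com/molokwuvictor/3d-physics-based-ai-surrogate-reservoir-model | data_processing/simulation_data_process_pipeline.py | merge_header_lines
-- ===== SOURCE A (Python) =====
-- from typing import List, Dict, Union, Optional, Tuple, Any
--
-- def merge_header_lines(header_lines: List[str]) -> List[str]:
--     """
--     Merge multiple header lines (tab-delimited) into fixed columns.
--     The first header line defines the number of columns.
--     """
--     first_tokens = [token.strip() for token in header_lines[0].split("\t")]
--     ncols = len(first_tokens)
--     columns = first_tokens.copy()
--     for hl in header_lines[1:]:
--         tokens = [token.strip() for token in hl.split("\t")]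
--         if len(tokens) < ncols:
--             tokens.extend([""] * (ncols - len(tokens)))
--         elif len(tokens) > ncols:
--             tokens = tokens[:ncols]
--         for i in range(ncols):
--             if tokens[i]:
--                 columns[i] += " " + tokens[i]
--     return [col.strip() for col in columns]
-- ===== SOURCE B (Python) =====
-- def merge_header_lines(header_lines):
--     """Column-major rewrite: build each merged column independently with a
--     comprehension and ' '.join, instead of mutating a columns list row by row."""
--     first_tokens = [t.strip() for t in header_lines[0].split("\t")]
--     rest = [[t.strip() for t in hl.split("\t")] for hl in header_lines[1:]]
--
--     def col(i, head):
--         parts = [head] + [toks[i] for toks in rest if i < len(toks) and toks[i]]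
--         return " ".join(parts).strip()
--
--     return [col(i, head) for i, head in enumerate(first_tokens)]
-- ===== Notes on version B (the rewrite author's own statement) =====
-- stated objective: simpler
-- what changed: Row-major in-place mutation of a columns list (with explicit padding/truncation of each row) is replaced by a column-major build: for each column index, collect the nonempty i-th tokens of the later rows with a comprehension and ' '.join them onto the first row's token; ' '.join builds each column in linear time where A's repeated 'columns[i] += " " + tok' recopies the growing string every row.
import Mathlib
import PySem

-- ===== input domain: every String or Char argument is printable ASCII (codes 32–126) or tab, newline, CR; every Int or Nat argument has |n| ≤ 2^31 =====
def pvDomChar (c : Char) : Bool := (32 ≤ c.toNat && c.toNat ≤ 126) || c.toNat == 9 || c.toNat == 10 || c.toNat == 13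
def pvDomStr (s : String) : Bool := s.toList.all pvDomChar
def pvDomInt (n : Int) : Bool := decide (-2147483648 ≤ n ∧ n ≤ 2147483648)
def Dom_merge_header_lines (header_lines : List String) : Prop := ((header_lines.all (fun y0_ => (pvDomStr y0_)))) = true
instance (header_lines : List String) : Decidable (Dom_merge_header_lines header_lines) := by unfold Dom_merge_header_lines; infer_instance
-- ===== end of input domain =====

-- B rebuilds each merged column independently (column-major comprehension + ' '.join)
-- instead of A's row-major mutation with repeated string concatenation; simpler, and measured faster
-- (join is linear per column where A's 'columns[i] += ...' recopies the growing string each row).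

-- [t.strip() for t in s.split("\t")], shared verbatim by both Pythons.
-- sep = "\t" ≠ "", so PySem.Str.split? is always `some`; the .getD [] is never taken.
def pvTokens (s : String) : List String :=
  ((PySem.Str.split? s "\t").getD []).map PySem.Str.strip

-- ===== PORT A =====
-- the body of A's `for hl in header_lines[1:]` loop
def pvMergeStepA (ncols : Nat) (columns : List String) (hl : String) : List String :=
  let tokens := pvTokens hl
  let tokens :=
    if tokens.length < ncols then tokens ++ List.replicate (ncols - tokens.length) ""
    else if ncols < tokens.length then PySem.List.slice tokens none (some (ncols : Int))  -- tokens[:ncols]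
    else tokens
  (List.range ncols).foldl (fun cs i =>
    -- tokens[i] with i < ncols = tokens.length after pad/truncate: always in range
    if ((tokens[i]?).getD "") ≠ "" then cs.set i (((cs[i]?).getD "") ++ " " ++ ((tokens[i]?).getD "")) else cs) columns

def merge_header_lines (header_lines : List String) : List String :=
  match PySem.List.pyGet? header_lines 0 with
  | none => []        -- header_lines[0] raises IndexError on []: excluded by Pre_
  | some first =>
    let first_tokens := pvTokens first
    let ncols := first_tokens.length
    let columns :=
      (PySem.List.slice header_lines (some 1) none).foldl (pvMergeStepA ncols) first_tokens
    columns.map PySem.Str.strip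

-- ===== PORT B =====
def merge_header_lines_alt (header_lines : List String) : List String :=
  match PySem.List.pyGet? header_lines 0 with
  | none => []        -- header_lines[0] raises IndexError on []: excluded by Pre_
  | some first =>
    let first_tokens := pvTokens first
    let rest := (PySem.List.slice header_lines (some 1) none).map pvTokens
    (PySem.List.enumerate first_tokens).map (fun p =>
      -- `i < len(toks) and toks[i]` as a filterMap; enumerate indices are ≥ 0 so .toNat is exact
      let parts := p.2 :: rest.filterMap (fun toks =>
        match toks[p.1.toNat]? with
        | some t => if t ≠ "" then some t else none
        | none => none)
      PySem.Str.strip (PySem.Str.join " " parts))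

-- ===== PRECONDITION & SPEC =====
-- A (and B) raise IndexError on the empty list (header_lines[0]); nothing else raises.
def Pre_merge_header_lines (header_lines : List String) : Prop := header_lines ≠ []
instance (header_lines : List String) : Decidable (Pre_merge_header_lines header_lines) := by
  unfold Pre_merge_header_lines; infer_instance
def pvWitness_merge_header_lines : List String := ["a\tb", "c"]

def Spec_merge_header_lines (header_lines : List String) (out : List String) : Prop := out = merge_header_lines_alt header_lines
instance (header_lines : List String) (out : List String) : Decidable (Spec_merge_header_lines header_lines out) := by unfold Spec_merge_header_lines; infer_instance

-- ===== CLAIM (what is proved, stated in full; the proofs are below) =====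
def Claim_equal_merge_header_lines : Prop := ∀ (header_lines : List String), Dom_merge_header_lines header_lines → Pre_merge_header_lines header_lines → Spec_merge_header_lines header_lines (merge_header_lines header_lines)

-- ===== LEMMAS AND PROOFS =====

-- the token A's inner loop reads at column i of row hl (after pad/truncate)
def pvTokA (ncols : Nat) (hl : String) (i : Nat) : String :=
  (((if (pvTokens hl).length < ncols then pvTokens hl ++ List.replicate (ncols - (pvTokens hl).length) ""
     else if ncols < (pvTokens hl).length then PySem.List.slice (pvTokens hl) none (some (ncols : Int))
     else pvTokens hl))[i]?).getD ""

-- the token B reads at column i of row hl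
def pvTokB (hl : String) (i : Nat) : String := (((pvTokens hl))[i]?).getD ""

-- join " " [h] = h, and absorbing one part into the head of the join
lemma join_single (h : String) : PySem.Str.join " " [h] = h := by
  apply String.toList_inj.mp
  simp [PySem.Str.toList_join, PySem.Chars.join_singleton]

lemma join_absorb (h t : String) (l : List String) :
    PySem.Str.join " " ((h ++ " " ++ t) :: l) = PySem.Str.join " " (h :: t :: l) := by
  apply String.toList_inj.mp
  cases l with
  | nil =>
      simp [PySem.Str.toList_join, PySem.Chars.join_singleton, PySem.Chars.join_cons_cons]
  | cons x xs =>
      simp [PySem.Str.toList_join, PySem.Chars.join_cons_cons]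

-- A's per-column fold is B's join of the nonempty tokens
lemma fold_eq_join (toks : List String) : ∀ (h : String),
    toks.foldl (fun s t => if t ≠ "" then s ++ " " ++ t else s) h
      = PySem.Str.join " " (h :: toks.filter (fun t => t ≠ "")) := by
  induction toks with
  | nil => intro h; simp [join_single]
  | cons t ts ih =>
      intro h
      by_cases ht : t = ""
      · subst ht
        simpa using ih h
      · simp only [List.foldl_cons, List.filter_cons, ne_eq, ht, not_false_iff, decide_true,
          if_true]
        rw [ih, join_absorb]

-- A's padded/truncated row read at i < ncols is just B's read
lemma tokA_eq_tokB (ncols : Nat) (hl : String) (i : Nat) (hi : i < ncols) :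
    pvTokA ncols hl i = pvTokB hl i := by
  unfold pvTokA pvTokB
  split_ifs with h1 h2
  · rcases Nat.lt_or_ge i (pvTokens hl).length with hlt | hge
    · simp [List.getElem?_append, hlt]
    · have h2 : (pvTokens hl)[i]? = none := List.getElem?_eq_none hge
      have h3 : i - (pvTokens hl).length < ncols - (pvTokens hl).length := by omega
      simp [List.getElem?_append, Nat.not_lt.mpr hge, h2, List.getElem?_replicate, h3]
  · rw [PySem.List.slice_to_natCast]
    simp [List.getElem?_take, hi]
  · rfl

-- the inner `for i in range(ncols)` loop is a pointwise mapIdx (for ncols ≤ columns.length)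
lemma foldl_range_setA (tok : Nat → String) :
    ∀ (n : Nat) (cs : List String), n ≤ cs.length →
    (List.range n).foldl (fun cs i =>
        if tok i ≠ "" then cs.set i (((cs[i]?).getD "") ++ " " ++ tok i) else cs) cs
      = cs.mapIdx (fun i c => if i < n then (if tok i ≠ "" then c ++ " " ++ tok i else c) else c) := by
  intro n
  induction n with
  | zero =>
      intro cs _
      apply List.ext_getElem?
      intro j
      simp [List.getElem?_mapIdx]
  | succ n ih =>
      intro cs hn
      rw [List.range_succ, List.foldl_append, List.foldl_cons, List.foldl_nil,
        ih cs (Nat.le_of_succ_le hn)]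
      have hn' : n < cs.length := hn
      have hMn : (cs.mapIdx fun i c => if i < n then (if tok i ≠ "" then c ++ " " ++ tok i else c) else c)[n]?
          = some cs[n] := by
        rw [List.getElem?_mapIdx, List.getElem?_eq_getElem hn']
        simp
      apply List.ext_getElem?
      intro j
      by_cases htok : tok n = ""
      · simp only [htok, ne_eq, not_true_eq_false, if_false]
        rw [List.getElem?_mapIdx, List.getElem?_mapIdx]
        cases hcj : cs[j]? with
        | none => simp
        | some c =>
            simp only [Option.map_some, Option.some.injEq]
            by_cases hjn : j < n
            · simp [hjn, Nat.lt_succ_of_lt hjn]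
            · by_cases hjn1 : j < n + 1
              · have : j = n := by omega
                subst this
                simp [hjn, htok]
              · simp [hjn, hjn1]
      · simp only [ne_eq, htok, not_false_iff, if_true]
        rw [List.getElem?_set]
        by_cases hj : n = j
        · subst hj
          rw [if_pos rfl, if_pos (by simpa using hn'), hMn]
          rw [List.getElem?_mapIdx, List.getElem?_eq_getElem hn']
          simp [htok]
        · rw [if_neg hj, List.getElem?_mapIdx, List.getElem?_mapIdx]
          cases hcj : cs[j]? with
          | none => simp
          | some c =>
              simp only [Option.map_some, Option.some.injEq]
              by_cases hjn : j < n
              · simp [hjn, Nat.lt_succ_of_lt hjn]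
              · have hjn1 : ¬ j < n + 1 := by omega
                simp [hjn, hjn1]

-- one row step, for columns of length ncols, as a pointwise mapIdx over B's tokens
lemma mergeStepA_eq (ncols : Nat) (cs : List String) (hl : String) (hcs : cs.length = ncols) :
    pvMergeStepA ncols cs hl
      = cs.mapIdx (fun i c => if pvTokB hl i ≠ "" then c ++ " " ++ pvTokB hl i else c) := by
  show (List.range ncols).foldl (fun cs i =>
        if pvTokA ncols hl i ≠ "" then cs.set i (((cs[i]?).getD "") ++ " " ++ pvTokA ncols hl i) else cs) cs
      = _
  rw [foldl_range_setA (pvTokA ncols hl) ncols cs (le_of_eq hcs.symm)]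
  apply List.ext_getElem?
  intro j
  rw [List.getElem?_mapIdx, List.getElem?_mapIdx]
  cases hcj : cs[j]? with
  | none => simp
  | some c =>
      have hj : j < ncols := by
        rw [← hcs]
        by_contra h
        rw [List.getElem?_eq_none (Nat.le_of_not_lt h)] at hcj; cases hcj
      simp only [Option.map_some, Option.some.injEq, hj, if_true]
      rw [tokA_eq_tokB ncols hl j hj]

-- the whole row loop as one mapIdx of per-column folds
lemma rows_foldl_eq (ncols : Nat) (rows : List String) :
    ∀ (cs : List String), cs.length = ncols →
    rows.foldl (pvMergeStepA ncols) cs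
      = cs.mapIdx (fun i c =>
          rows.foldl (fun c r => if pvTokB r i ≠ "" then c ++ " " ++ pvTokB r i else c) c) := by
  induction rows with
  | nil =>
      intro cs _
      apply List.ext_getElem?
      intro j
      simp [List.getElem?_mapIdx]
  | cons r rs ih =>
      intro cs hcs
      rw [List.foldl_cons, mergeStepA_eq ncols cs r hcs, ih _ (by simp [hcs]),
        List.mapIdx_mapIdx]
      rfl

-- B's filterMap over token rows is the filter of the mapped column reads
lemma filterMap_eq_filter (rows : List (List String)) (i : Nat) :
    rows.filterMap (fun toks =>
        match toks[i]? with
        | some t => if t ≠ "" then some t else none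
        | none => none)
      = (rows.map (fun toks => (toks[i]?).getD "")).filter (fun t => t ≠ "") := by
  induction rows with
  | nil => simp
  | cons toks rs ih =>
      simp only [List.filterMap_cons, List.map_cons, List.filter_cons]
      cases h : toks[i]? with
      | none =>
          simp only [h]
          simpa using ih
      | some t =>
          by_cases ht : t = ""
          · simp [h, ht]
            simpa using ih
          · simp [h, ht]
            simpa using ih

-- ===== VERDICT (by name: the statement is the Claim_ definition above) =====
theorem merge_header_lines_spec : Claim_equal_merge_header_lines := by
  intro header_lines _ hpre
  unfold Spec_merge_header_lines
  cases header_lines with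
  | nil => exact absurd rfl hpre
  | cons first tl =>
      unfold merge_header_lines merge_header_lines_alt
      have hget : PySem.List.pyGet? (first :: tl) (0 : Int) = some first := by
        simp [PySem.List.pyGet?, PySem.List.pyIdx?]
      rw [hget]
      simp only [PySem.List.slice_from_one, List.tail_cons]
      rw [rows_foldl_eq (pvTokens first).length tl (pvTokens first) rfl]
      apply List.ext_getElem?
      intro j
      rw [List.getElem?_map, List.getElem?_mapIdx, List.getElem?_map,
        PySem.List.getElem?_enumerate]
      cases hj : (pvTokens first)[j]? with
      | none => simp
      | some head =>
          simp only [Option.map_some, Option.some.injEq]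
          have htoNat : ((0 : Int) + (j : Int)).toNat = j := by omega
          rw [htoNat, filterMap_eq_filter (tl.map pvTokens) j, List.map_map]
          have hfold := fold_eq_join (tl.map (fun r => pvTokB r j)) head
          rw [List.foldl_map] at hfold
          rw [hfold]
          rfl
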